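-- pv_equiv track=rewrite | github.com/louisoutin/lit-gpt | lit_gpt/finetune/lora.py | get_max_seq_length
-- ===== SOURCE A (Python) =====
-- from typing import Optional, List, Dict, Tuple
--
-- def get_max_seq_length(
--     data: List[Dict], override_max_seq_length: int | None = None
-- ) -> Tuple[int, int, int]:
--     # find out the minimum max_seq_length required during fine-tuning (saves memory!)
--     lengths = [len(d["input_ids"]) for d in data]
--     max_seq_length = max(lengths)
--     longest_seq_ix = lengths.index(max_seq_length)
--     # support easy override at the top of the file
--     return (
--         override_max_seq_length
--         if isinstance(override_max_seq_length, int)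
--         else max_seq_length,
--         max_seq_length,
--         longest_seq_ix,
--     )
-- ===== SOURCE B (Python) =====
-- def get_max_seq_length(data, override_max_seq_length=None):
--     # single fused pass instead of building a lengths list + max + .index
--     if not data:
--         raise ValueError("max() arg is an empty sequence")
--     max_seq_length = len(data[0]["input_ids"])
--     longest_seq_ix = 0
--     for i, d in enumerate(data[1:], start=1):
--         n = len(d["input_ids"])
--         if n > max_seq_length:
--             max_seq_length = n
--             longest_seq_ix = i
--     return (
--         override_max_seq_length
--         if isinstance(override_max_seq_length, int)
--         else max_seq_length,
--         max_seq_length,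
--         longest_seq_ix,
--     )
-- ===== Notes on version B (the rewrite author's own statement) =====
-- stated objective: alternative
-- what changed: Replaces the three passes (build a lengths list, max(), .index()) by one fused loop that tracks the running maximum length and its first index, with no intermediate list.
import Mathlib
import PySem

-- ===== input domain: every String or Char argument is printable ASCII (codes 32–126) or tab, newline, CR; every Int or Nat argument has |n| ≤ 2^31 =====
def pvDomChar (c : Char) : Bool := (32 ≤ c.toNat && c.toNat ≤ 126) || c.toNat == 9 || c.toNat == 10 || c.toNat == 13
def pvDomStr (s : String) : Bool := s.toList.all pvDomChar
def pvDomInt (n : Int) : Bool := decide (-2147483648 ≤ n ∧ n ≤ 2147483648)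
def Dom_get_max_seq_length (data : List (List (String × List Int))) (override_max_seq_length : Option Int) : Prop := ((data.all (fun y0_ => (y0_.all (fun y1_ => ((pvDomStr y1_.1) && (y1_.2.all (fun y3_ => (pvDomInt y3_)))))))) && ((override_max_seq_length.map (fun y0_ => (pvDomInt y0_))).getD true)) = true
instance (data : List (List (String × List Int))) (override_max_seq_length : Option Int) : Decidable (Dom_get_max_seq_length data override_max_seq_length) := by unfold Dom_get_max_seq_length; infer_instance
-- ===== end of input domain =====

-- B fuses A's three passes (lengths list, max(), .index()) into one loop tracking the running max and its first index.

-- len(d["input_ids"]): exact under Pre_ (key present); shared by both ports since both Pythons compute it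
def pvLen (d : List (String × List Int)) : Int :=
  ((((PySem.Dict.ofList d).get? "input_ids").getD []).length : Int)

-- ===== PORT A =====
def get_max_seq_length (data : List (List (String × List Int))) (override_max_seq_length : Option Int) : Int × Int × Int :=
  let lengths := data.map pvLen
  let max_seq_length := (PySem.List.max? lengths (fun x => x)).getD 0
  let longest_seq_ix : Int := (((PySem.List.index? lengths max_seq_length).getD 0 : Nat) : Int)
  ((match override_max_seq_length with
    | some n => n
    | none => max_seq_length), max_seq_length, longest_seq_ix)

-- ===== PORT B =====
def altGo : List (List (String × List Int)) → Int → Int → Nat → Int × Int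
  | [], bl, bi, _ => (bl, bi)
  | d :: ds, bl, bi, i =>
    let n := pvLen d
    if bl < n then altGo ds n (i : Int) (i + 1) else altGo ds bl bi (i + 1)

def get_max_seq_length_alt (data : List (List (String × List Int))) (override_max_seq_length : Option Int) : Int × Int × Int :=
  match data with
  | [] => (0, 0, 0)   -- unreachable under Pre_ (Python B raises ValueError on empty data)
  | d :: ds =>
    let p := altGo ds (pvLen d) 0 1
    ((match override_max_seq_length with
      | some n => n
      | none => p.1), p.1, p.2)

-- ===== PRECONDITION & SPEC =====
-- Pre_ excludes exactly the inputs where Python A raises: empty data (Python's max of an empty sequence raises ValueError)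
-- and an element missing the "input_ids" key (KeyError). B raises there too.
def Pre_get_max_seq_length (data : List (List (String × List Int))) (override_max_seq_length : Option Int) : Prop :=
  data ≠ [] ∧ data.all (fun d => ((PySem.Dict.ofList d).get? "input_ids").isSome) = true

instance (data : List (List (String × List Int))) (override_max_seq_length : Option Int) : Decidable (Pre_get_max_seq_length data override_max_seq_length) := by unfold Pre_get_max_seq_length; infer_instance

def pvWitness_get_max_seq_length : (List (List (String × List Int))) × Option Int :=
  ([[("input_ids", [1, 2])], [("input_ids", [3, 4, 5])]], none)

def Spec_get_max_seq_length (data : List (List (String × List Int))) (override_max_seq_length : Option Int) (out : Int × Int × Int) : Prop := out = get_max_seq_length_alt data override_max_seq_length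
instance (data : List (List (String × List Int))) (override_max_seq_length : Option Int) (out : Int × Int × Int) : Decidable (Spec_get_max_seq_length data override_max_seq_length out) := by unfold Spec_get_max_seq_length; infer_instance

-- ===== CLAIM (what is proved, stated in full; the proofs are below) =====
def Claim_equal_get_max_seq_length : Prop := ∀ (data : List (List (String × List Int))) (override_max_seq_length : Option Int), Dom_get_max_seq_length data override_max_seq_length → Pre_get_max_seq_length data override_max_seq_length → Spec_get_max_seq_length data override_max_seq_length (get_max_seq_length data override_max_seq_length)

-- ===== LEMMAS AND PROOFS =====

theorem le_foldl_max_init (ls : List Int) (b : Int) : b ≤ ls.foldl max b := by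
  induction ls generalizing b with
  | nil => simp
  | cons l t ih => exact le_trans (le_max_left b l) (ih (max b l))

theorem foldl_max_eq_or_mem (ls : List Int) (b : Int) :
    ls.foldl max b = b ∨ ls.foldl max b ∈ ls := by
  induction ls generalizing b with
  | nil => simp
  | cons l t ih =>
    rcases ih (max b l) with h | h
    · simp only [List.foldl_cons, h]
      rcases max_choice b l with h' | h'
      · exact Or.inl h'
      · exact Or.inr (by simp [h'])
    · exact Or.inr (List.mem_cons_of_mem _ (by simpa using h))

theorem altGo_eq (ds : List (List (String × List Int))) (bl bi : Int) (i : Nat) :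
    altGo ds bl bi i =
      (let m := (ds.map pvLen).foldl max bl;
       (m, if m = bl then bi
           else (i : Int) + (((PySem.List.index? (ds.map pvLen) m).getD 0 : Nat) : Int))) := by
  induction ds generalizing bl bi i with
  | nil => simp [altGo]
  | cons d t ih =>
    simp only [altGo, List.map_cons, List.foldl_cons]
    by_cases h : bl < pvLen d
    · rw [if_pos h, ih]
      have hmax : max bl (pvLen d) = pvLen d := max_eq_right h.le
      rw [hmax]
      set m := (t.map pvLen).foldl max (pvLen d) with hm
      have hlm : pvLen d ≤ m := le_foldl_max_init _ _
      have hne : m ≠ bl := by omega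
      simp only [hne, if_false]
      by_cases hml : m = pvLen d
      · rw [hml, PySem.List.index?_cons_self]
        simp
      · have hmem : m ∈ t.map pvLen := by
          rcases foldl_max_eq_or_mem (t.map pvLen) (pvLen d) with h' | h'
          · exact absurd h' hml
          · exact h'
        rw [PySem.List.index?_cons_of_ne _ (Ne.symm hml)]
        obtain ⟨k, hk⟩ := Option.isSome_iff_exists.1 ((PySem.List.index?_isSome_iff (t.map pvLen) m).2 hmem)
        rw [PySem.List.index?_eq_idxOf?] at hk
        simp [hk, hml]
        omega
    · rw [if_neg h, ih]
      have hmax : max bl (pvLen d) = bl := max_eq_left (by omega)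
      rw [hmax]
      set m := (t.map pvLen).foldl max bl with hm
      have hlm : bl ≤ m := le_foldl_max_init _ _
      by_cases hmb : m = bl
      · simp [hmb]
      · have hml : m ≠ pvLen d := by omega
        have hmem : m ∈ t.map pvLen := by
          rcases foldl_max_eq_or_mem (t.map pvLen) bl with h' | h'
          · exact absurd h' hmb
          · exact h'
        simp only [hmb, if_false]
        rw [PySem.List.index?_cons_of_ne _ (Ne.symm hml)]
        obtain ⟨k, hk⟩ := Option.isSome_iff_exists.1 ((PySem.List.index?_isSome_iff (t.map pvLen) m).2 hmem)
        rw [PySem.List.index?_eq_idxOf?] at hk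
        simp [hk]
        omega

-- ===== VERDICT (by name: the statement is the Claim_ definition above) =====
theorem get_max_seq_length_spec : Claim_equal_get_max_seq_length := by
  intro data ov _hDom hPre
  obtain ⟨hne, _⟩ := hPre
  unfold Spec_get_max_seq_length
  cases data with
  | nil => exact absurd rfl hne
  | cons d ds =>
    simp only [get_max_seq_length, get_max_seq_length_alt, altGo_eq, List.map_cons,
      PySem.List.max?_id_cons, Option.getD_some]
    set m := (ds.map pvLen).foldl max (pvLen d) with hm
    have hlm : pvLen d ≤ m := le_foldl_max_init _ _
    by_cases hml : m = pvLen d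
    · rw [hml, PySem.List.index?_cons_self]
      simp [hml]
    · have hmem : m ∈ ds.map pvLen := by
        rcases foldl_max_eq_or_mem (ds.map pvLen) (pvLen d) with h' | h'
        · exact absurd h' hml
        · exact h'
      rw [PySem.List.index?_cons_of_ne _ (Ne.symm hml)]
      obtain ⟨k, hk⟩ := Option.isSome_iff_exists.1 ((PySem.List.index?_isSome_iff (ds.map pvLen) m).2 hmem)
      rw [PySem.List.index?_eq_idxOf?] at hk
      simp [hk]
      rw [if_neg hml]
      omega
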